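-- pv_equiv track=rewrite | github.com/fmgrotepass/AoC21 | Codebucket/output03.py | coFromList
-- ===== SOURCE A (Python) =====
-- def coFromList(inList, mask):
--     outList = []
--     count1=0
--     count0=0
--     for i in inList:
--         if i & mask:
--             count1+=1
--         else:
--             count0+=1
--     for i in inList:
--         if (count1 < count0):
--             if i & mask:
--                 outList.append(i)
--         else:
--             if not (i & mask):
--                 outList.append(i)
--     return outList
-- ===== SOURCE B (Python) =====
-- def coFromList(inList, mask):
--     ones = []
--     zeros = []
--     for i in inList:
--         if i & mask:
--             ones.append(i)
--         else:
--             zeros.append(i)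
--     return ones if len(ones) < len(zeros) else zeros
-- ===== Notes on version B (the rewrite author's own statement) =====
-- stated objective: simpler
-- what changed: Single partitioning pass into ones/zeros lists with a final whole-list selection by length, replacing A's count pass followed by a second re-filtering pass over the input.
import Mathlib
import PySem

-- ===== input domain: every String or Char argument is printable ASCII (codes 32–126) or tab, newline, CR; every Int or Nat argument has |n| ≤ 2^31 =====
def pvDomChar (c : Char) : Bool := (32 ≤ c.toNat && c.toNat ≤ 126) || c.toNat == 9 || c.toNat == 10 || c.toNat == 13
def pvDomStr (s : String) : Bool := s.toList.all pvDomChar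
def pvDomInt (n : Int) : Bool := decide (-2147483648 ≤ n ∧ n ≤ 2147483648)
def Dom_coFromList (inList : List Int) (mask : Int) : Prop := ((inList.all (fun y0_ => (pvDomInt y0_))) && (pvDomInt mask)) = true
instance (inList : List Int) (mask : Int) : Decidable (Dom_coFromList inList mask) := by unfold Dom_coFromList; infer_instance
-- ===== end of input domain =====

-- B replaces A's count-then-refilter two-pass structure by one partitioning pass plus a length comparison (objective: simpler).
-- ===== PORT A =====
def coFromList (inList : List Int) (mask : Int) : List Int :=
  let counts := inList.foldl
    (fun (c : Int × Int) i =>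
      if PySem.Int.band i mask != 0 then (c.1 + 1, c.2) else (c.1, c.2 + 1)) (0, 0)
  inList.foldl
    (fun outList i =>
      if counts.1 < counts.2 then
        if PySem.Int.band i mask != 0 then outList ++ [i] else outList
      else
        if !(PySem.Int.band i mask != 0) then outList ++ [i] else outList) []

-- ===== PORT B =====
def coFromList_alt (inList : List Int) (mask : Int) : List Int :=
  let p := inList.foldl
    (fun (acc : List Int × List Int) i =>
      if PySem.Int.band i mask != 0 then (acc.1 ++ [i], acc.2) else (acc.1, acc.2 ++ [i]))
    ([], [])
  if p.1.length < p.2.length then p.1 else p.2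

-- ===== PRECONDITION & SPEC =====
def Spec_coFromList (inList : List Int) (mask : Int) (out : List Int) : Prop := out = coFromList_alt inList mask
instance (inList : List Int) (mask : Int) (out : List Int) : Decidable (Spec_coFromList inList mask out) := by unfold Spec_coFromList; infer_instance

-- ===== CLAIM (what is proved, stated in full; the proofs are below) =====
def Claim_equal_coFromList : Prop := ∀ (inList : List Int) (mask : Int), Dom_coFromList inList mask → Spec_coFromList inList mask (coFromList inList mask)

-- ===== LEMMAS AND PROOFS =====

-- A's counting loop computes the two countP values.
theorem pvCounts_eq (inList : List Int) (mask : Int) :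
    inList.foldl
      (fun (c : Int × Int) i =>
        if PySem.Int.band i mask != 0 then (c.1 + 1, c.2) else (c.1, c.2 + 1)) (0, 0)
    = ((inList.countP (fun i => PySem.Int.band i mask != 0) : Int),
       (inList.countP (fun i => !(PySem.Int.band i mask != 0)) : Int)) := by
  have h : (fun (c : Int × Int) i =>
      if PySem.Int.band i mask != 0 then (c.1 + 1, c.2) else (c.1, c.2 + 1))
    = (fun (c : Int × Int) i =>
      ((fun a (i : Int) => if PySem.Int.band i mask != 0 then a + 1 else a) c.1 i,
       (fun a (i : Int) => if !(PySem.Int.band i mask != 0) then a + 1 else a) c.2 i)) := by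
    funext c i
    by_cases hc : PySem.Int.band i mask != 0 <;> simp [hc]
  rw [h, PySem.List.foldl_prod_mk
      (f := fun a (i : Int) => if PySem.Int.band i mask != 0 then a + 1 else a)
      (g := fun a (i : Int) => if !(PySem.Int.band i mask != 0) then a + 1 else a),
    PySem.List.foldl_if_add_one, PySem.List.foldl_if_add_one]
  simp

-- B's partitioning loop computes the two filters.
theorem pvPartition_eq (inList : List Int) (mask : Int) :
    inList.foldl
      (fun (acc : List Int × List Int) i =>
        if PySem.Int.band i mask != 0 then (acc.1 ++ [i], acc.2) else (acc.1, acc.2 ++ [i]))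
      ([], [])
    = (inList.filter (fun i => PySem.Int.band i mask != 0),
       inList.filter (fun i => !(PySem.Int.band i mask != 0))) := by
  have h : (fun (acc : List Int × List Int) i =>
      if PySem.Int.band i mask != 0 then (acc.1 ++ [i], acc.2) else (acc.1, acc.2 ++ [i]))
    = (fun (acc : List Int × List Int) i =>
      ((fun a (i : Int) => if PySem.Int.band i mask != 0 then a ++ [i] else a) acc.1 i,
       (fun a (i : Int) => if !(PySem.Int.band i mask != 0) then a ++ [i] else a) acc.2 i)) := by
    funext acc i
    by_cases hc : PySem.Int.band i mask != 0 <;> simp [hc]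
  rw [h, PySem.List.foldl_prod_mk
      (f := fun a (i : Int) => if PySem.Int.band i mask != 0 then a ++ [i] else a)
      (g := fun a (i : Int) => if !(PySem.Int.band i mask != 0) then a ++ [i] else a),
    PySem.List.foldl_append_if_eq_filter, PySem.List.foldl_append_if_eq_filter]
  simp

-- ===== VERDICT (by name: the statement is the Claim_ definition above) =====
theorem coFromList_spec : Claim_equal_coFromList := by
  intro inList mask _
  unfold Spec_coFromList coFromList coFromList_alt
  rw [pvCounts_eq, pvPartition_eq]
  simp only [← List.countP_eq_length_filter]
  by_cases h : inList.countP (fun i => PySem.Int.band i mask != 0)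
      < inList.countP (fun i => !(PySem.Int.band i mask != 0))
  · have h' : ((inList.countP (fun i => PySem.Int.band i mask != 0) : Int))
        < (inList.countP (fun i => !(PySem.Int.band i mask != 0)) : Int) := by
      exact_mod_cast h
    simp only [if_pos h', if_pos h]
    rw [PySem.List.foldl_append_if_eq_filter]
    simp
  · have h' : ¬ ((inList.countP (fun i => PySem.Int.band i mask != 0) : Int))
        < (inList.countP (fun i => !(PySem.Int.band i mask != 0)) : Int) := by
      exact_mod_cast h
    simp only [if_neg h', if_neg h]
    rw [PySem.List.foldl_append_if_eq_filter]
    simp
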